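-- pv_equiv track=rewrite | github.com/zamansky/advent2020 | src/day10.py | build_reverse_map
-- ===== SOURCE A (Python) =====
-- def build_reverse_map(data):
--     graph={}
--     data = data[::-1]
--     for i in range(len(data)):
--         current = data[i]
--         j=i+1;
--         while (j<len(data) and data[i] - data[j] <= 3):
--             j=j+1
--         graph[current]=data[i+1:j]
--     return graph
-- ===== SOURCE B (Python) =====
-- def build_reverse_map(data):
--     # Monotonic-stack + binary-search algorithm: walk the reversed list from its
--     # far end, maintaining a stack of "record minima" indices (strictly
--     # decreasing values toward the bottom).  For each position i the first later
--     # index whose value drops below r[i]-3 is found by binary search on the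
--     # stack, giving the window's end; the per-element linear scan of A vanishes.
--     r = list(reversed(data))
--     n = len(r)
--     stack = []   # indices, oldest (largest index) first; values strictly increasing
--     bounds = []
--     for i in range(n - 1, -1, -1):
--         t = r[i] - 3
--         lo, hi = 0, len(stack)
--         while lo < hi:                      # count entries with value < t
--             mid = (lo + hi) // 2
--             if r[stack[mid]] < t:
--                 lo = mid + 1
--             else:
--                 hi = mid
--         bounds.append(stack[lo - 1] if lo > 0 else n)
--         while stack and r[stack[-1]] >= r[i]:
--             stack.pop()
--         stack.append(i)
--     bounds.reverse()
--     graph = {}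
--     for i in range(n):
--         graph[r[i]] = r[i + 1: bounds[i]]
--     return graph
-- ===== Notes on version B (the rewrite author's own statement) =====
-- stated objective: faster
-- what changed: B replaces A's per-element linear forward scan of the reversed list by a right-to-left monotonic stack of record-minimum indices with a binary search per element to locate each window's end, then emits the dict from the precomputed bound array.
import Mathlib
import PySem

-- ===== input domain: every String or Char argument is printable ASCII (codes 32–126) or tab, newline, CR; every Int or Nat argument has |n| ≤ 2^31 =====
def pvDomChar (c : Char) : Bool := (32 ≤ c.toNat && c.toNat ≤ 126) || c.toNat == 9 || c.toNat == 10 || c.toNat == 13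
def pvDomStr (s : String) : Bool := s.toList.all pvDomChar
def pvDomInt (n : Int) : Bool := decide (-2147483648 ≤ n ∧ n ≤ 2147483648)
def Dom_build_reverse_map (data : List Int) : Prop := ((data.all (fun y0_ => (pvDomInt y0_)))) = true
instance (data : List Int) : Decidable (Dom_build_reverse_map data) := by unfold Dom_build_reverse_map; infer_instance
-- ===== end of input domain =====

-- B replaces A's per-element forward window scan by a monotonic stack of record-minimum
-- indices with a binary search per element for the window's end (objective: faster).

-- ===== PORT A =====
-- the inner `while (j<len(data) and data[i]-data[j] <= 3): j=j+1` of A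
def pvWhileA (r : List Int) (xi : Int) (j : Nat) : Nat :=
  if j < r.length ∧ xi - r.getD j 0 ≤ 3 then pvWhileA r xi (j + 1) else j
termination_by r.length - j
decreasing_by rename_i h; omega

def build_reverse_map (data : List Int) : List (Int × List Int) :=
  let r := (PySem.List.slice? data none none (-1)).getD []   -- data[::-1]
  ((List.range r.length).foldl
      (fun (g : PySem.Dict Int (List Int)) (i : Nat) =>
        let current := PySem.List.pyGetD r (i : Int) 0
        let j := pvWhileA r current (i + 1)
        g.insert current (PySem.List.slice r (some ((i : Int) + 1)) (some (j : Int))))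
      PySem.Dict.empty).items

-- ===== PORT B =====
-- `while lo < hi: mid=(lo+hi)//2; if r[stack[mid]] < t: lo=mid+1 else: hi=mid` of B
-- (structural recursion on a fuel bound ≥ hi - lo; the value never depends on the fuel)
def pvBs (r : List Int) (stack : List Nat) (t : Int) : Nat → Nat → Nat → Nat
  | 0, lo, _ => lo
  | fuel + 1, lo, hi =>
    if lo < hi then
      let mid := (lo + hi) / 2
      if r.getD (stack.getD mid 0) 0 < t then pvBs r stack t fuel (mid + 1) hi
      else pvBs r stack t fuel lo mid
    else lo

-- `while stack and r[stack[-1]] >= r[i]: stack.pop()` of B (stack kept bottom-first,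
-- stack[-1] ported as getD (length-1); fuel = the stack's length bounds the pops)
def pvPop (r : List Int) (x : Int) : Nat → List Nat → List Nat
  | 0, s => s
  | _ + 1, [] => []
  | fuel + 1, a :: rest =>
    if x ≤ r.getD ((a :: rest).getD rest.length 0) 0 then pvPop r x fuel (a :: rest).dropLast
    else a :: rest

-- `for i in range(n-1,-1,-1): …` of B; fuel i+1 processes indices i, i-1, …, 0
def pvLoop (r : List Int) (n : Nat) : Nat → List Nat × List Nat → List Nat × List Nat
  | 0, st => st
  | i + 1, (stack, bounds) =>
    let x := PySem.List.pyGetD r (i : Int) 0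
    let t := x - 3
    let lo := pvBs r stack t stack.length 0 stack.length
    let b := if 0 < lo then stack.getD (lo - 1) 0 else n
    pvLoop r n i (pvPop r x stack.length stack ++ [i], bounds ++ [b])

def build_reverse_map_alt (data : List Int) : List (Int × List Int) :=
  let r := data.reverse
  let n := r.length
  let bounds := (pvLoop r n n ([], [])).2.reverse
  ((List.range n).foldl
      (fun (g : PySem.Dict Int (List Int)) (i : Nat) =>
        g.insert (PySem.List.pyGetD r (i : Int) 0)
          (PySem.List.slice r (some ((i : Int) + 1)) (some ((bounds.getD i 0 : Nat) : Int))))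
      PySem.Dict.empty).items

-- ===== PRECONDITION & SPEC =====
def Spec_build_reverse_map (data : List Int) (out : List (Int × List Int)) : Prop := out = build_reverse_map_alt data
instance (data : List Int) (out : List (Int × List Int)) : Decidable (Spec_build_reverse_map data out) := by unfold Spec_build_reverse_map; infer_instance

-- ===== CLAIM (what is proved, stated in full; the proofs are below) =====
def Claim_equal_build_reverse_map : Prop := ∀ (data : List Int), Dom_build_reverse_map data → Spec_build_reverse_map data (build_reverse_map data)

-- ===== LEMMAS AND PROOFS =====

-- "b is the end of index i's window": first position after i whose value violates r[i]-·≤3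
def pvGoodB (r : List Int) (i b : Nat) : Prop :=
  i < b ∧ b ≤ r.length ∧ (∀ j, i < j → j < b → r.getD i 0 - r.getD j 0 ≤ 3) ∧
    (b < r.length → r.getD i 0 - r.getD b 0 > 3)

theorem pvGoodB_unique (r : List Int) (i a b : Nat) (ha : pvGoodB r i a) (hb : pvGoodB r i b) :
    a = b := by
  obtain ⟨ha1, ha2, ha3, ha4⟩ := ha
  obtain ⟨hb1, hb2, hb3, hb4⟩ := hb
  rcases Nat.lt_trichotomy a b with h | h | h
  · have := hb3 a ha1 h
    have := ha4 (by omega)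
    omega
  · exact h
  · have := ha3 b hb1 h
    have := hb4 (by omega)
    omega

theorem pvWhileA_good (r : List Int) (xi : Int) :
    ∀ j, j ≤ r.length →
      j ≤ pvWhileA r xi j ∧ pvWhileA r xi j ≤ r.length ∧
      (∀ k, j ≤ k → k < pvWhileA r xi j → xi - r.getD k 0 ≤ 3) ∧
      (pvWhileA r xi j < r.length → xi - r.getD (pvWhileA r xi j) 0 > 3) := by
  intro j
  induction hn : r.length - j generalizing j with
  | zero =>
    intro hj
    have hje : j = r.length := by omega
    unfold pvWhileA
    rw [if_neg (by omega)]
    exact ⟨le_rfl, by omega, by omega, by omega⟩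
  | succ n ih =>
    intro hj
    rw [pvWhileA]
    by_cases hc : j < r.length ∧ xi - r.getD j 0 ≤ 3
    · rw [if_pos hc]
      obtain ⟨h1, h2, h3, h4⟩ := ih (j + 1) (by omega) (by omega)
      refine ⟨by omega, h2, ?_, h4⟩
      intro k hk1 hk2
      rcases Nat.eq_or_lt_of_le hk1 with he | hl
      · rw [← he]; exact hc.2
      · exact h3 k (by omega) hk2
    · rw [if_neg hc]
      refine ⟨le_rfl, hj, by omega, ?_⟩
      intro hjl
      have : ¬ xi - r.getD j 0 ≤ 3 := fun h => hc ⟨hjl, h⟩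
      omega

theorem whileA_goodB (r : List Int) (i : Nat) (hi : i < r.length) :
    pvGoodB r i (pvWhileA r (r.getD i 0) (i + 1)) := by
  obtain ⟨h1, h2, h3, h4⟩ := pvWhileA_good r (r.getD i 0) (i + 1) (by omega)
  exact ⟨by omega, h2, fun j hj1 hj2 => h3 j (by omega) hj2, h4⟩

-- the stack invariant: about to process index i, the stack (bottom-first) holds indices in
-- (i, n), with indices strictly decreasing and values strictly increasing along the list,
-- and every index in (i, n) is dominated by some stack entry at or before it
def pvInv (r : List Int) (i : Nat) (S : List Nat) : Prop :=
  (∀ p, p < S.length → i < S.getD p 0 ∧ S.getD p 0 < r.length) ∧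
  (∀ p q, p < q → q < S.length →
      S.getD q 0 < S.getD p 0 ∧ r.getD (S.getD p 0) 0 < r.getD (S.getD q 0) 0) ∧
  (∀ j, i < j → j < r.length →
      ∃ p, p < S.length ∧ S.getD p 0 ≤ j ∧ r.getD (S.getD p 0) 0 ≤ r.getD j 0)

theorem pvBs_spec (r : List Int) (S : List Nat) (t : Int)
    (mono : ∀ p q, p < q → q < S.length →
      r.getD (S.getD p 0) 0 < r.getD (S.getD q 0) 0) :
    ∀ fuel lo hi, hi - lo ≤ fuel → lo ≤ hi → hi ≤ S.length →
      (∀ p, p < lo → r.getD (S.getD p 0) 0 < t) →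
      (∀ p, hi ≤ p → p < S.length → ¬ r.getD (S.getD p 0) 0 < t) →
      pvBs r S t fuel lo hi ≤ S.length ∧
      (∀ p, p < pvBs r S t fuel lo hi → r.getD (S.getD p 0) 0 < t) ∧
      (∀ p, pvBs r S t fuel lo hi ≤ p → p < S.length → ¬ r.getD (S.getD p 0) 0 < t) := by
  intro fuel
  induction fuel with
  | zero =>
    intro lo hi hf hlh hhs hlo hhi
    have hle : lo = hi := by omega
    simp only [pvBs]
    exact ⟨by omega, hlo, by rw [hle]; exact hhi⟩
  | succ n ih =>
    intro lo hi hf hlh hhs hlo hhi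
    rw [pvBs]
    by_cases h : lo < hi
    · rw [if_pos h]
      simp only
      by_cases hc : r.getD (S.getD ((lo + hi) / 2) 0) 0 < t
      · rw [if_pos hc]
        refine ih ((lo + hi) / 2 + 1) hi (by omega) (by omega) hhs ?_ hhi
        intro p hp
        rcases Nat.lt_or_ge p ((lo + hi) / 2) with h1 | h1
        · calc r.getD (S.getD p 0) 0 < r.getD (S.getD ((lo + hi) / 2) 0) 0 :=
                mono p _ h1 (by omega)
            _ < t := hc
        · have : p = (lo + hi) / 2 := by omega
          rw [this]; exact hc
      · rw [if_neg hc]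
        refine ih lo ((lo + hi) / 2) (by omega) (by omega) (by omega) hlo ?_
        intro p hp1 hp2 hlt
        rcases Nat.lt_or_ge ((lo + hi) / 2) p with h1 | h1
        · exact hc (lt_trans (mono _ p h1 hp2) hlt)
        · have : p = (lo + hi) / 2 := by omega
          rw [this] at hlt; exact hc hlt
    · rw [if_neg h]
      have hle : lo = hi := by omega
      exact ⟨by omega, hlo, by rw [hle]; exact hhi⟩

-- the bound computed from the stack is the window end
theorem pvBound_good (r : List Int) (i : Nat) (S : List Nat) (hInv : pvInv r i S)
    (hi : i < r.length) :
    pvGoodB r i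
      (if 0 < pvBs r S (r.getD i 0 - 3) S.length 0 S.length then
        S.getD (pvBs r S (r.getD i 0 - 3) S.length 0 S.length - 1) 0
      else r.length) := by
  obtain ⟨hmem, hord, hdom⟩ := hInv
  set t := r.getD i 0 - 3 with ht
  obtain ⟨hm1, hm2, hm3⟩ := pvBs_spec r S t (fun p q hpq hq => (hord p q hpq hq).2)
    (S.length) 0 S.length (by omega) (by omega) le_rfl (by omega) (by omega)
  set m := pvBs r S t S.length 0 S.length with hmdef
  -- no index in (i, b) can violate
  have hwin : ∀ b, (∀ p, p < m → b ≤ S.getD p 0) →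
      ∀ j, i < j → j < b → j < r.length → r.getD i 0 - r.getD j 0 ≤ 3 := by
    intro b hbl j hj1 hj2 hj3
    by_contra hviol
    obtain ⟨p, hp1, hp2, hp3⟩ := hdom j hj1 hj3
    have hplt : r.getD (S.getD p 0) 0 < t := by omega
    have hpm : p < m := by
      by_contra hge
      exact hm3 p (by omega) hp1 hplt
    have := hbl p hpm
    omega
  by_cases hz : 0 < m
  · rw [if_pos hz]
    set b := S.getD (m - 1) 0 with hb
    have hbmem := hmem (m - 1) (by omega)
    refine ⟨hbmem.1, by omega, ?_, ?_⟩
    · intro j hj1 hj2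
      refine hwin b ?_ j hj1 hj2 (by omega)
      intro p hp
      rcases Nat.lt_or_ge p (m - 1) with h1 | h1
      · exact le_of_lt (hord p (m - 1) h1 (by omega)).1
      · have : p = m - 1 := by omega
        rw [this]
    · intro _
      have h2 := hm2 (m - 1) (by omega)
      rw [← hb] at h2
      omega
  · rw [if_neg hz]
    have hm0 : m = 0 := by omega
    refine ⟨hi, le_rfl, ?_, by omega⟩
    intro j hj1 hj2
    exact hwin r.length (by omega) j hj1 hj2 hj2

-- pvPop returns a prefix; what it drops all has value ≥ x, and the new top has value < x
theorem pvPop_spec (r : List Int) (x : Int) :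
    ∀ fuel S, S.length ≤ fuel → ∃ k, k ≤ S.length ∧ pvPop r x fuel S = S.take k ∧
      (∀ p, k ≤ p → p < S.length → x ≤ r.getD (S.getD p 0) 0) ∧
      (0 < k → r.getD (S.getD (k - 1) 0) 0 < x) := by
  intro fuel
  induction fuel with
  | zero =>
    intro S hS
    have : S = [] := List.length_eq_zero_iff.mp (by omega)
    subst this
    exact ⟨0, by simp [pvPop]⟩
  | succ n ih =>
    intro S hS
    match S with
    | [] => exact ⟨0, by simp [pvPop]⟩
    | a :: rest =>
      rw [pvPop]
      by_cases hc : x ≤ r.getD ((a :: rest).getD rest.length 0) 0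
      · rw [if_pos hc]
        have hdl : (a :: rest).dropLast.length = rest.length := by simp
        obtain ⟨k, hk1, hk2, hk3, hk4⟩ := ih (a :: rest).dropLast (by simp at hS ⊢; omega)
        rw [hdl] at hk1
        have hgd : ∀ p, p < rest.length → (a :: rest).dropLast.getD p 0 = (a :: rest).getD p 0 := by
          intro p hp
          rw [List.getD_eq_getElem?_getD, List.getD_eq_getElem?_getD, List.getElem?_dropLast]
          rw [if_pos (by simp; omega)]
        refine ⟨k, by simp; omega, ?_, ?_, ?_⟩
        · rw [hk2, List.dropLast_eq_take, List.take_take]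
          congr 1
          simp
          omega
        · intro p hkp hpl
          simp only [List.length_cons] at hpl
          by_cases hpn : p < rest.length
          · rw [← hgd p hpn]
            exact hk3 p hkp (by rw [hdl]; exact hpn)
          · have hpe : p = rest.length := by omega
            subst hpe
            exact hc
        · intro hk0
          rw [← hgd (k - 1) (by omega)]
          exact hk4 hk0
      · rw [if_neg hc]
        refine ⟨(a :: rest).length, le_rfl, ?_, ?_, ?_⟩
        · rw [List.take_of_length_le le_rfl]
        · intro p h1 h2
          omega
        · intro _
          simp only [List.length_cons, Nat.add_sub_cancel]
          omega

-- popping then pushing index i+1 re-establishes the invariant for processing index i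
theorem pvInv_step (r : List Int) (i : Nat) (S : List Nat) (hInv : pvInv r (i + 1) S)
    (hn : i + 1 < r.length) :
    pvInv r i (pvPop r (r.getD (i + 1) 0) S.length S ++ [i + 1]) := by
  obtain ⟨hmem, hord, hdom⟩ := hInv
  obtain ⟨k, hk1, hk2, hk3, hk4⟩ := pvPop_spec r (r.getD (i + 1) 0) S.length S le_rfl
  rw [hk2]
  set T := S.take k ++ [i + 1] with hT
  have hTlen : T.length = k + 1 := by simp [hT]; omega
  have hTget : ∀ p, p < k → T.getD p 0 = S.getD p 0 := by
    intro p hp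
    rw [hT, List.getD_eq_getElem?_getD, List.getElem?_append_left (by simp; omega),
      List.getElem?_take]
    rw [if_pos hp, ← List.getD_eq_getElem?_getD]
  have hTlast : T.getD k 0 = i + 1 := by
    rw [hT, List.getD_eq_getElem?_getD]
    rw [List.getElem?_append_right (by simp)]
    simp [Nat.min_eq_left hk1]
  refine ⟨?_, ?_, ?_⟩
  · intro p hp
    rw [hTlen] at hp
    by_cases hpk : p < k
    · rw [hTget p hpk]
      have := hmem p (by omega)
      omega
    · have : p = k := by omega
      rw [this, hTlast]
      omega
  · intro p q hpq hq
    rw [hTlen] at hq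
    by_cases hqk : q < k
    · rw [hTget p (by omega), hTget q hqk]
      exact hord p q hpq (by omega)
    · have hqe : q = k := by omega
      rw [hqe, hTget p (by omega), hTlast]
      have hmp := hmem p (by omega)
      constructor
      · omega
      · have htop := hk4 (by omega)
        rcases Nat.lt_or_ge p (k - 1) with h1 | h1
        · have := (hord p (k - 1) h1 (by omega)).2
          omega
        · have : p = k - 1 := by omega
          rw [this]
          omega
  · intro j hj1 hj2
    by_cases hje : j = i + 1
    · exact ⟨k, by omega, by rw [hTlast]; omega, by rw [hTlast, hje]⟩
    · obtain ⟨p, hp1, hp2, hp3⟩ := hdom j (by omega) hj2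
      by_cases hpk : p < k
      · exact ⟨p, by omega, by rw [hTget p hpk]; exact hp2, by rw [hTget p hpk]; exact hp3⟩
      · have := hk3 p (by omega) hp1
        exact ⟨k, by omega, by rw [hTlast]; omega, by rw [hTlast]; omega⟩

-- the loop produces, after bs, one good bound per processed index (index i - p at position p)
theorem pvLoop_spec (r : List Int) :
    ∀ i S bs, i < r.length → pvInv r i S →
      ∃ L, (pvLoop r r.length (i + 1) (S, bs)).2 = bs ++ L ∧ L.length = i + 1 ∧
        ∀ p, p ≤ i → pvGoodB r (i - p) (L.getD p 0) := by
  intro i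
  induction i with
  | zero =>
    intro S bs hn hInv
    rw [pvLoop]
    simp only [Nat.cast_zero, PySem.List.pyGetD_zero]
    rw [pvLoop]
    refine ⟨[if 0 < pvBs r S (r.getD 0 0 - 3) S.length 0 S.length then
        S.getD (pvBs r S (r.getD 0 0 - 3) S.length 0 S.length - 1) 0 else r.length], rfl, rfl, ?_⟩
    intro p hp
    have : p = 0 := by omega
    subst this
    simpa using pvBound_good r 0 S hInv hn
  | succ i ih =>
    intro S bs hn hInv
    rw [pvLoop]
    simp only [PySem.List.pyGetD_natCast]
    have hstep := pvInv_step r i S hInv hn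
    obtain ⟨L', hL1, hL2, hL3⟩ := ih (pvPop r (r.getD (i + 1) 0) S.length S ++ [i + 1])
      (bs ++ [if 0 < pvBs r S (r.getD (i + 1) 0 - 3) S.length 0 S.length then
        S.getD (pvBs r S (r.getD (i + 1) 0 - 3) S.length 0 S.length - 1) 0 else r.length])
      (by omega) hstep
    refine ⟨(if 0 < pvBs r S (r.getD (i + 1) 0 - 3) S.length 0 S.length then
        S.getD (pvBs r S (r.getD (i + 1) 0 - 3) S.length 0 S.length - 1) 0 else r.length) :: L', ?_, by simp [hL2], ?_⟩
    · rw [hL1]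
      simp
    · intro p hp
      match p with
      | 0 =>
        simpa using pvBound_good r (i + 1) S hInv hn
      | p + 1 =>
        have := hL3 p (by omega)
        simpa [Nat.succ_sub_succ] using this
-- ===== VERDICT (by name: the statement is the Claim_ definition above) =====
theorem build_reverse_map_spec : Claim_equal_build_reverse_map := by
  intro data _
  unfold Spec_build_reverse_map build_reverse_map build_reverse_map_alt
  rw [PySem.List.slice?_none_none_neg_one]
  simp only [Option.getD_some]
  set r := data.reverse with hr
  by_cases hn : r.length = 0
  · simp [hn]
  · obtain ⟨L, hL1, hL2, hL3⟩ := pvLoop_spec r (r.length - 1) [] []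
      (by omega) ⟨by simp, by simp, by intro j h1 h2; omega⟩
    have hfuel : r.length - 1 + 1 = r.length := by omega
    rw [hfuel] at hL1
    congr 1
    apply PySem.List.foldl_congr_mem
    intro g i hi
    have hilt : i < r.length := List.mem_range.mp hi
    congr 2
    have hbound : (pvLoop r r.length r.length ([], [])).2.reverse.getD i 0 =
        L.getD (r.length - 1 - i) 0 := by
      rw [hL1]
      simp only [List.nil_append]
      rw [List.getD_eq_getElem?_getD, List.getElem?_reverse (by omega),
        ← List.getD_eq_getElem?_getD]
      congr 1
      omega
    rw [hbound]
    have hgood : pvGoodB r i (L.getD (r.length - 1 - i) 0) := by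
      have := hL3 (r.length - 1 - i) (by omega)
      rwa [show r.length - 1 - (r.length - 1 - i) = i by omega] at this
    have hwa : pvGoodB r i (pvWhileA r (PySem.List.pyGetD r (i : Int) 0) (i + 1)) := by
      rw [PySem.List.pyGetD_natCast]
      exact whileA_goodB r i hilt
    rw [pvGoodB_unique r i _ _ hgood hwa]
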